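-- pv_equiv track=rewrite | github.com/MrBrantCode/unitest_baseline | mut_generate/mist_train_cf/cf_20997/solution.py | longest_non_palindromic_word
-- ===== SOURCE A (Python) =====
-- def longest_non_palindromic_word(text):
--     # Split the text into words
--     words = text.split()
--
--     # Initialize variables
--     longest_word = ""
--     longest_length = 0
--
--     # Iterate through each word
--     for word in words:
--         # Check if the word is a palindrome
--         if word == word[::-1]:
--             continue
--
--         # Check if the word is longer than the current longest word
--         if len(word) > longest_length:
--             longest_word = word
--             longest_length = len(word)
--
--     return longest_word
-- ===== SOURCE B (Python) =====
-- def longest_non_palindromic_word(text):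
--     # Sort-then-scan: stably sort the words by descending length, then the first
--     # non-palindromic word in that order is the answer (first-maximum on ties).
--     for word in sorted(text.split(), key=len, reverse=True):
--         if word != word[::-1]:
--             return word
--     return ""
-- ===== Notes on version B (the rewrite author's own statement) =====
-- stated objective: alternative
-- what changed: Replaces A's one-pass longest/longest_length bookkeeping loop by a sort-then-scan: stably sort the words by descending length, then return the first non-palindromic word (Python's stable reverse sort reproduces A's first-maximum tie-breaking; the final return "" reproduces the empty/all-palindromic case).
import Mathlib
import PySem

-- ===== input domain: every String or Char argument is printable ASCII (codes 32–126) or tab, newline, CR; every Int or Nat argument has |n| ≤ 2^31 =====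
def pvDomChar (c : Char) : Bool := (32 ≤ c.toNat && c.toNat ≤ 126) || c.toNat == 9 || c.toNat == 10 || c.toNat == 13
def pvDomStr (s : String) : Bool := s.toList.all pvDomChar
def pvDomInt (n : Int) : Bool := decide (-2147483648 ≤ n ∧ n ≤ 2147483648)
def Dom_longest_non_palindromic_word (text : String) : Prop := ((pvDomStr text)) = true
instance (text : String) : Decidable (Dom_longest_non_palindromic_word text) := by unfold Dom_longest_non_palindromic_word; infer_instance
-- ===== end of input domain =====

-- B replaces A's single-pass bookkeeping loop by a sort-then-scan: stably sort the words
-- by descending length and return the first non-palindromic one (alternative decomposition).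


-- ===== PORT A =====
-- w[::-1] as a string
def pvRev (w : String) : String := (PySem.Str.slice? w none none (-1)).getD ""

def longest_non_palindromic_word (text : String) : String :=
  let words := PySem.Str.split₀ text
  let res := words.foldl
    (fun (acc : String × Int) word =>
      if word == pvRev word then acc
      else if PySem.Str.len word > acc.2 then (word, PySem.Str.len word) else acc)
    ("", 0)
  res.1

-- ===== PORT B =====
def longest_non_palindromic_word_alt (text : String) : String :=
  let ordered := PySem.List.sorted (PySem.Str.split₀ text) PySem.Str.len true
  (ordered.find? (fun word => word != pvRev word)).getD ""

-- ===== PRECONDITION & SPEC =====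
def Spec_longest_non_palindromic_word (text : String) (out : String) : Prop := out = longest_non_palindromic_word_alt text
instance (text : String) (out : String) : Decidable (Spec_longest_non_palindromic_word text out) := by unfold Spec_longest_non_palindromic_word; infer_instance

-- ===== CLAIM (what is proved, stated in full; the proofs are below) =====
def Claim_equal_longest_non_palindromic_word : Prop := ∀ (text : String), Dom_longest_non_palindromic_word text → Spec_longest_non_palindromic_word text (longest_non_palindromic_word text)

-- ===== LEMMAS AND PROOFS =====

-- the non-palindrome test, the descending-length comparison, and the two loop bodies
def pvP (w : String) : Bool := w != pvRev w

def pvBef (a b : String) : Bool := decide (PySem.Str.len b < PySem.Str.len a)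

def pvStep (o : Option String) (w : String) : Option String :=
  if pvP w then
    match o with
    | none => some w
    | some m => if PySem.Str.len m < PySem.Str.len w then some w else some m
  else o

def pvAStep (acc : String × Int) (word : String) : String × Int :=
  if pvP word then (if PySem.Str.len word > acc.2 then (word, PySem.Str.len word) else acc) else acc

def pvDec (l : List String) : Prop := l.Pairwise (fun a b => PySem.Str.len b ≤ PySem.Str.len a)

lemma pvLen_lt {a b : String} (h : PySem.Str.len a < PySem.Str.len b) : a.length < b.length := by
  rw [PySem.Str.len_eq, PySem.Str.len_eq] at h
  exact_mod_cast h

lemma pvDec_insertBy (w : String) (acc : List String) (h : pvDec acc) :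
    pvDec (PySem.List.insertBy pvBef w acc) := by
  induction acc with
  | nil => simp [PySem.List.insertBy, pvDec]
  | cons y ys ih =>
    rcases List.pairwise_cons.mp h with ⟨hy, hys⟩
    by_cases hb : pvBef w y = true
    · have hlt : PySem.Str.len y < PySem.Str.len w := by simpa [pvBef] using hb
      simp only [PySem.List.insertBy, hb, if_true]
      refine List.pairwise_cons.mpr ⟨?_, h⟩
      intro z hz
      rcases List.mem_cons.mp hz with rfl | hz
      · exact le_of_lt hlt
      · exact le_trans (hy z hz) (le_of_lt hlt)
    · have hle : PySem.Str.len w ≤ PySem.Str.len y := by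
        have := (not_iff_not.mpr (show pvBef w y = true ↔ PySem.Str.len y < PySem.Str.len w by simp [pvBef])).mp hb
        omega
      simp only [PySem.List.insertBy, hb]
      refine List.pairwise_cons.mpr ⟨?_, ih hys⟩
      intro z hz
      rcases (PySem.List.mem_insertBy pvBef w z ys).mp hz with rfl | hz
      · exact hle
      · exact hy z hz

lemma find?_insertBy_false (w : String) (acc : List String) (hp : pvP w = false) :
    (PySem.List.insertBy pvBef w acc).find? pvP = acc.find? pvP := by
  induction acc with
  | nil => simp [PySem.List.insertBy, List.find?, hp]
  | cons y ys ih =>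
    by_cases hb : pvBef w y = true
    · simp [PySem.List.insertBy, hb, List.find?, hp]
    · simp only [PySem.List.insertBy, hb]
      cases hy : pvP y with
      | true => simp [List.find?, hy]
      | false => simp [List.find?, hy, ih]

lemma find?_insertBy_true (w : String) (acc : List String) (hp : pvP w = true) (hs : pvDec acc) :
    (PySem.List.insertBy pvBef w acc).find? pvP
      = match acc.find? pvP with
        | none => some w
        | some m => if PySem.Str.len m < PySem.Str.len w then some w else some m := by
  induction acc with
  | nil => simp [PySem.List.insertBy, List.find?, hp]
  | cons y ys ih =>
    rcases List.pairwise_cons.mp hs with ⟨hy, hys⟩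
    by_cases hb : pvBef w y = true
    · have hlt : PySem.Str.len y < PySem.Str.len w := by simpa [pvBef] using hb
      simp only [PySem.List.insertBy, hb, if_true]
      cases hfy : pvP y with
      | true =>
        have := pvLen_lt hlt
        simp [List.find?, hp, hfy]
        intro h
        omega
      | false =>
        cases hf : List.find? pvP ys with
        | none => simp [List.find?, hp, hfy, hf]
        | some m =>
          have hm : m ∈ ys := List.mem_of_find?_eq_some hf
          have hmw := pvLen_lt (lt_of_le_of_lt (hy m hm) hlt)
          simp [List.find?, hp, hfy, hf]
          intro h
          omega
    · have hle : PySem.Str.len w ≤ PySem.Str.len y := by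
        have := (not_iff_not.mpr (show pvBef w y = true ↔ PySem.Str.len y < PySem.Str.len w by simp [pvBef])).mp hb
        omega
      simp only [PySem.List.insertBy, hb]
      cases hfy : pvP y with
      | true =>
        have hwy : ¬ y.length < w.length := by
          rw [PySem.Str.len_eq, PySem.Str.len_eq] at hle
          simp only [← String.length_toList]
          omega
        simp [List.find?, hfy]
        intro h
        exact absurd h hwy
      | false => simp [List.find?, hfy, ih hys]

lemma find?_foldl_insertBy (ws : List String) (acc : List String) (hs : pvDec acc) :
    (ws.foldl (fun a x => PySem.List.insertBy pvBef x a) acc).find? pvP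
      = ws.foldl pvStep (acc.find? pvP) := by
  induction ws generalizing acc with
  | nil => rfl
  | cons w t ih =>
    simp only [List.foldl]
    rw [ih _ (pvDec_insertBy w acc hs)]
    congr 1
    cases hp : pvP w with
    | false => rw [find?_insertBy_false w acc hp]; simp [pvStep, hp]
    | true =>
      rw [find?_insertBy_true w acc hp hs]
      cases hf : acc.find? pvP with
      | none => simp [pvStep, hp]
      | some m => simp [pvStep, hp]

lemma pair_fold_eq (ws : List String) (m : String) :
    ws.foldl pvAStep (m, PySem.Str.len m)
      = (((ws.foldl pvStep (some m)).getD ""),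
         PySem.Str.len ((ws.foldl pvStep (some m)).getD "")) := by
  induction ws generalizing m with
  | nil => rfl
  | cons w t ih =>
    simp only [List.foldl]
    cases hp : pvP w with
    | false =>
      rw [show pvAStep (m, PySem.Str.len m) w = (m, PySem.Str.len m) by simp [pvAStep, hp],
        show pvStep (some m) w = some m by simp [pvStep, hp]]
      exact ih m
    | true =>
      by_cases hlt : PySem.Str.len m < PySem.Str.len w
      · have h' := pvLen_lt hlt
        rw [show pvAStep (m, PySem.Str.len m) w = (w, PySem.Str.len w) by
            simp [pvAStep, hp]
            intro h; omega,
          show pvStep (some m) w = some w by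
            simp [pvStep, hp]
            intro h; omega]
        exact ih w
      · have h' : ¬ m.length < w.length := fun h => hlt (by
          rw [PySem.Str.len_eq, PySem.Str.len_eq]; exact_mod_cast h)
        rw [show pvAStep (m, PySem.Str.len m) w = (m, PySem.Str.len m) by
            simp [pvAStep, hp, gt_iff_lt]
            intro h; exact absurd h h',
          show pvStep (some m) w = some m by
            simp [pvStep, hp]
            intro h; exact absurd h h']
        exact ih m

lemma startup_fold (ws : List String) (hne : ∀ w ∈ ws, w ≠ "") :
    (ws.foldl pvAStep ("", 0)).1 = (ws.foldl pvStep none).getD "" := by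
  induction ws with
  | nil => rfl
  | cons w t ih =>
    simp only [List.foldl]
    cases hp : pvP w with
    | false =>
      rw [show pvAStep ("", 0) w = ("", 0) by simp [pvAStep, hp],
        show pvStep none w = none by simp [pvStep, hp]]
      exact ih (fun v hv => hne v (List.mem_cons_of_mem _ hv))
    | true =>
      have hw : w ≠ "" := hne w (List.mem_cons_self ..)
      have hlen : (0 : Int) < PySem.Str.len w := by
        simp only [PySem.Str.len]
        have htl : w.toList ≠ [] := by
          intro h; apply hw
          have := congrArg String.ofList h
          simpa using this
        exact_mod_cast List.length_pos_iff.mpr htl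
      rw [show pvAStep ("", 0) w = (w, PySem.Str.len w) by
          simp [pvAStep, hp]
          intro h; exact absurd h hw,
        show pvStep none w = some w by simp [pvStep, hp]]
      rw [pair_fold_eq]

lemma split₀go_ne_nil (s cur : List Char) (acc : List (List Char))
    (hacc : ∀ w ∈ acc, w ≠ []) :
    ∀ w ∈ PySem.Chars.split₀.go s cur acc, w ≠ [] := by
  induction s generalizing cur acc with
  | nil =>
    intro w hw
    unfold PySem.Chars.split₀.go at hw
    by_cases h : cur.isEmpty
    · simp [h] at hw
      exact hacc w hw
    · simp [h] at hw
      rcases hw with h1 | h1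
      all_goals first
        | exact hacc w h1
        | (subst h1
           simp only [ne_eq, List.reverse_eq_nil_iff]
           intro hc; rw [hc] at h; simp at h)
  | cons c rest ih =>
    intro w hw
    unfold PySem.Chars.split₀.go at hw
    by_cases hs : PySem.Chars.isspace c
    · by_cases h : cur.isEmpty
      · simp [hs, h] at hw
        exact ih [] acc hacc w hw
      · simp [hs, h] at hw
        refine ih [] (cur.reverse :: acc) ?_ w hw
        intro v hv
        rcases List.mem_cons.mp hv with h1 | h1
        · subst h1
          simp only [ne_eq, List.reverse_eq_nil_iff]
          intro hc; rw [hc] at h; simp at h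
        · exact hacc v h1
    · simp [hs] at hw
      exact ih (c :: cur) acc hacc w hw

lemma split₀_words_ne (text : String) : ∀ w ∈ PySem.Str.split₀ text, w ≠ "" := by
  intro w hw
  simp only [PySem.Str.split₀, List.mem_map] at hw
  obtain ⟨l, hl, rfl⟩ := hw
  have hne := split₀go_ne_nil text.toList [] [] (by simp) l hl
  intro h
  apply hne
  have := congrArg String.toList h
  simpa using this

-- ===== VERDICT (by name: the statement is the Claim_ definition above) =====
theorem longest_non_palindromic_word_spec : Claim_equal_longest_non_palindromic_word := by
  intro text _
  unfold Spec_longest_non_palindromic_word longest_non_palindromic_word longest_non_palindromic_word_alt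
  simp only []
  rw [show (fun (acc : String × Int) word =>
      if word == pvRev word then acc
      else if PySem.Str.len word > acc.2 then (word, PySem.Str.len word) else acc) = pvAStep by
      funext acc word
      by_cases h : word == pvRev word
      · simp [pvAStep, pvP, h, bne]
      · simp [pvAStep, pvP, Bool.eq_false_iff.mpr h, bne]]
  rw [show (fun word => word != pvRev word) = pvP from rfl]
  rw [PySem.List.sorted_rev_eq_foldl_insertBy,
    show (fun acc x => PySem.List.insertBy (fun a b => decide (PySem.Str.len b < PySem.Str.len a)) x acc)
      = (fun a x => PySem.List.insertBy pvBef x a) from rfl,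
    find?_foldl_insertBy _ [] (by simp [pvDec])]
  exact startup_fold _ (split₀_words_ne text)
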